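-- pv_equiv track=rewrite | github.com/brigitteunger/katas | test_reconstruct_itinerary.py | build_adjacency_tickets
-- ===== SOURCE A (Python) =====
-- from typing import List, Dict
--
-- def build_adjacency_tickets(
--                             tickets: List[List[str]]
--                             ) -> Dict[str, str]:
--     dict_tickets = {}
--     for ticket in tickets:
--         departure = ticket[0]
--         arrival = ticket[1]
--         if departure in dict_tickets:
--             dict_tickets[departure].append(arrival)
--             dict_tickets[departure].sort()
--         else:
--             dict_tickets[departure] = [arrival]
--     return dict_tickets
-- ===== SOURCE B (Python) =====
-- from typing import List, Dict
--
-- def build_adjacency_tickets(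
--                             tickets: List[List[str]]
--                             ) -> Dict[str, str]:
--     departures = dict.fromkeys(t[0] for t in tickets)
--     return {dep: sorted(t[1] for t in tickets if t[0] == dep)
--             for dep in departures}
-- ===== Notes on version B (the rewrite author's own statement) =====
-- stated objective: simpler
-- what changed: B first collects the distinct departures in first-seen order (dict.fromkeys) and then builds each entry by filtering the arrivals for that departure and sorting once, instead of A's incremental dict with a re-sort after every insertion.
import Mathlib
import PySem

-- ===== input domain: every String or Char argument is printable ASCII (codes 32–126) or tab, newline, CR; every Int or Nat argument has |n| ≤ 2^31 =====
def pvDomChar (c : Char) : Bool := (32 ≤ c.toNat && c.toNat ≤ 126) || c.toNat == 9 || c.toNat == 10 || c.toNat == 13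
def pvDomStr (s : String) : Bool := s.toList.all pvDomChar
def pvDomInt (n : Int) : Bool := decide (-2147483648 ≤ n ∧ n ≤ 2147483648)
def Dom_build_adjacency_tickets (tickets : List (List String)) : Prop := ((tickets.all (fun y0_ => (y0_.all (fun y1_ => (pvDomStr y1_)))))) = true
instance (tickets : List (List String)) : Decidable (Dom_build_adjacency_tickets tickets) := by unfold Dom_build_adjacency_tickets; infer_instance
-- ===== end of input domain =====

-- B collects the distinct departures in first-seen order and then builds each entry by
-- filtering and sorting that departure's arrivals once, instead of A's incremental dict
-- that re-sorts the list after every insertion (objective: simpler).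

-- ===== PORT A =====
def build_adjacency_tickets (tickets : List (List String)) : List (String × List String) :=
  (tickets.foldl (fun d ticket =>
      let departure := PySem.List.pyGetD ticket 0 ""   -- total form; Pre_ guarantees the index is in range
      let arrival := PySem.List.pyGetD ticket 1 ""
      if d.contains departure then
        d.insert departure (PySem.List.sorted (d.getD departure [] ++ [arrival]) (fun x => x) false)
      else
        d.insert departure [arrival])
    PySem.Dict.empty).items

-- ===== PORT B =====
def build_adjacency_tickets_alt (tickets : List (List String)) : List (String × List String) :=
  let departures := PySem.List.dedup (tickets.map (fun t => PySem.List.pyGetD t 0 ""))  -- dict.fromkeys: first occurrences, in order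
  departures.map (fun dep =>
    (dep, PySem.List.sorted
      ((tickets.filter (fun t => PySem.List.pyGetD t 0 "" == dep)).map
        (fun t => PySem.List.pyGetD t 1 ""))
      (fun x => x) false))

-- ===== PRECONDITION & SPEC =====
-- A raises IndexError on ticket[0]/ticket[1] when a ticket has fewer than two entries; exactly those inputs are excluded.
def Pre_build_adjacency_tickets (tickets : List (List String)) : Prop :=
  ∀ t ∈ tickets, 2 ≤ t.length
instance (tickets : List (List String)) : Decidable (Pre_build_adjacency_tickets tickets) := by unfold Pre_build_adjacency_tickets; infer_instance
def pvWitness_build_adjacency_tickets : List (List String) := [["JFK","SFO"],["JFK","ATL"],["SFO","JFK"]]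
def Spec_build_adjacency_tickets (tickets : List (List String)) (out : List (String × List String)) : Prop := out = build_adjacency_tickets_alt tickets
instance (tickets : List (List String)) (out : List (String × List String)) : Decidable (Spec_build_adjacency_tickets tickets out) := by unfold Spec_build_adjacency_tickets; infer_instance

-- ===== CLAIM (what is proved, stated in full; the proofs are below) =====
def Claim_equal_build_adjacency_tickets : Prop := ∀ (tickets : List (List String)), Dom_build_adjacency_tickets tickets → Pre_build_adjacency_tickets tickets → Spec_build_adjacency_tickets tickets (build_adjacency_tickets tickets)

-- ===== LEMMAS AND PROOFS =====

-- sort each value of a dict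
def pvMapSort (d : PySem.Dict String (List String)) : PySem.Dict String (List String) :=
  ⟨d.items.map (fun p => (p.1, PySem.List.sorted p.2 (fun x => x) false))⟩

lemma pvMapSort_contains (d : PySem.Dict String (List String)) (k : String) :
    (pvMapSort d).contains k = d.contains k := by
  simp only [pvMapSort, PySem.Dict.contains, List.any_map, Function.comp_def]

lemma pvMapSort_get? (d : PySem.Dict String (List String)) (k : String) :
    (pvMapSort d).get? k = (d.get? k).map (fun v => PySem.List.sorted v (fun x => x) false) := by
  simp only [pvMapSort, PySem.Dict.get?, List.find?_map, Function.comp_def, Option.map_map]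

lemma pv_get?_eq_none_of_not_contains (d : PySem.Dict String (List String)) (k : String)
    (h : ¬ d.contains k = true) : d.get? k = none := by
  have hall : ∀ x ∈ d.items, ¬ ((x.1 == k) = true) := by
    intro x hx hb
    exact h (List.any_eq_true.mpr ⟨x, hx, hb⟩)
  unfold PySem.Dict.get?
  rw [List.find?_eq_none.mpr hall]
  rfl

lemma pv_sorted_append_sorted (v : List String) (a : String) :
    PySem.List.sorted (PySem.List.sorted v (fun x => x) false ++ [a]) (fun x => x) false
      = PySem.List.sorted (v ++ [a]) (fun x => x) false := by
  apply PySem.List.sorted_eq_sorted_of_perm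
  · exact fun x y h => h
  · exact (PySem.List.sorted_perm v (fun x => x) false).append (List.Perm.refl [a])

-- inserting the sorted value into the sorted dict = sorting after inserting the raw value
lemma pv_insert_mapSort (d : PySem.Dict String (List String)) (k : String) (v : List String) :
    (pvMapSort d).insert k (PySem.List.sorted v (fun x => x) false)
      = pvMapSort (d.insert k v) := by
  unfold PySem.Dict.insert
  rw [pvMapSort_contains]
  by_cases h : d.contains k = true
  · rw [if_pos h, if_pos h]
    unfold pvMapSort
    simp only [List.map_map]
    congr 1
    apply List.map_congr_left
    intro p _
    simp only [Function.comp_def]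
    by_cases hp : (p.1 == k) = true
    · rw [if_pos hp, if_pos hp]
    · rw [if_neg hp, if_neg hp]
  · rw [if_neg h, if_neg h]
    simp [pvMapSort]

-- one ticket step: A's step on the sorted dict equals sorting after a plain grouping step
lemma pv_step (d : PySem.Dict String (List String)) (dep arr : String) :
    (if (pvMapSort d).contains dep then
        (pvMapSort d).insert dep
          (PySem.List.sorted ((pvMapSort d).getD dep [] ++ [arr]) (fun x => x) false)
      else (pvMapSort d).insert dep [arr])
    = pvMapSort (d.modify dep [] (fun v => v ++ [arr])) := by
  unfold PySem.Dict.modify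
  by_cases h : d.contains dep = true
  · have hc : (pvMapSort d).contains dep = true := by rw [pvMapSort_contains]; exact h
    have hval : PySem.List.sorted ((pvMapSort d).getD dep [] ++ [arr]) (fun x => x) false
        = PySem.List.sorted (d.getD dep [] ++ [arr]) (fun x => x) false := by
      simp only [PySem.Dict.getD, pvMapSort_get?]
      cases hg : d.get? dep with
      | none => rfl
      | some v => simpa using pv_sorted_append_sorted v arr
    rw [if_pos hc, hval, pv_insert_mapSort]
  · have hc : ¬ (pvMapSort d).contains dep = true := by rw [pvMapSort_contains]; exact h
    have hg : d.getD dep [] = [] := by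
      unfold PySem.Dict.getD
      rw [pv_get?_eq_none_of_not_contains d dep h]
      rfl
    rw [if_neg hc, hg]
    exact pv_insert_mapSort d dep [arr]

-- fold invariant: A's fold is the sorted image of the plain grouping fold
lemma pv_fold (ts : List (List String)) (d : PySem.Dict String (List String)) :
    ts.foldl (fun d ticket =>
      let departure := PySem.List.pyGetD ticket 0 ""
      let arrival := PySem.List.pyGetD ticket 1 ""
      if d.contains departure then
        d.insert departure (PySem.List.sorted (d.getD departure [] ++ [arrival]) (fun x => x) false)
      else d.insert departure [arrival]) (pvMapSort d)
    = pvMapSort (ts.foldl (fun d ticket =>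
        let departure := PySem.List.pyGetD ticket 0 ""
        let arrival := PySem.List.pyGetD ticket 1 ""
        d.modify departure [] (fun v => v ++ [arrival])) d) := by
  induction ts generalizing d with
  | nil => rfl
  | cons t ts ih =>
    simp only [List.foldl_cons]
    rw [pv_step]
    exact ih _

-- a dict with distinct keys is its key list paired with its lookups
lemma pv_items_of_nodup (l : List (String × List String))
    (h : (l.map Prod.fst).Nodup) :
    l = (l.map Prod.fst).map (fun k => (k, (PySem.Dict.mk l).getD k [])) := by
  induction l with
  | nil => rfl
  | cons p rest ih =>
    rw [List.map_cons, List.nodup_cons] at h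
    obtain ⟨hp, hrest⟩ := h
    simp only [List.map_cons]
    have hhead : (PySem.Dict.mk (p :: rest)).getD p.1 [] = p.2 := by
      simp [PySem.Dict.getD, PySem.Dict.get?]
    rw [hhead]
    have htail : (rest.map Prod.fst).map (fun k => (k, (PySem.Dict.mk (p :: rest)).getD k []))
        = (rest.map Prod.fst).map (fun k => (k, (PySem.Dict.mk rest).getD k [])) := by
      apply List.map_congr_left
      intro k hk
      have hne : ¬ ((p.1 == k) = true) := by
        intro hb
        exact hp (beq_iff_eq.mp hb ▸ hk)
      simp [PySem.Dict.getD, PySem.Dict.get?, hne]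
    rw [htail, ← ih hrest]

-- the grouping fold, read off as keys + lookups
lemma pv_raw_items (tickets : List (List String)) :
    (tickets.foldl (fun d ticket =>
        let departure := PySem.List.pyGetD ticket 0 ""
        let arrival := PySem.List.pyGetD ticket 1 ""
        d.modify departure [] (fun v => v ++ [arrival])) PySem.Dict.empty).items
    = (PySem.Set.ofList (tickets.map (fun t => PySem.List.pyGetD t 0 ""))).map
        (fun dep => (dep,
          (tickets.filter (fun t => PySem.List.pyGetD t 0 "" == dep)).map
            (fun t => PySem.List.pyGetD t 1 ""))) := by
  set R := tickets.foldl (fun d ticket =>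
        d.modify (PySem.List.pyGetD ticket 0 "") [] (fun v => v ++ [PySem.List.pyGetD ticket 1 ""]))
      (PySem.Dict.empty : PySem.Dict String (List String)) with hR
  have hkeys : R.keys = PySem.Set.ofList (tickets.map (fun t => PySem.List.pyGetD t 0 "")) := by
    rw [hR, PySem.Dict.keys_foldl_modify_key]
    rfl
  have hnodup : R.keys.Nodup := by
    rw [hR]
    exact PySem.Dict.nodup_keys_foldl_modify_key _ _ _ _ _ (by simp [PySem.Dict.keys, PySem.Dict.empty])
  have hget : ∀ dep, R.getD dep []
      = (tickets.filter (fun t => PySem.List.pyGetD t 0 "" == dep)).map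
          (fun t => PySem.List.pyGetD t 1 "") := by
    intro dep
    have hmap : R = (tickets.map (fun t => (PySem.List.pyGetD t 0 "", PySem.List.pyGetD t 1 ""))).foldl
        (fun d p => d.modify p.1 [] (fun v => v ++ [p.2])) PySem.Dict.empty := by
      rw [hR, List.foldl_map]
    rw [hmap, PySem.Dict.getD_foldl_modify_append]
    simp [List.filter_map, Function.comp_def]
  have hitems : R.items = R.keys.map (fun k => (k, R.getD k [])) := by
    obtain ⟨l⟩ := R
    exact pv_items_of_nodup l hnodup
  rw [hitems, hkeys]
  apply List.map_congr_left
  intro dep _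
  rw [hget dep]

-- ===== VERDICT (by name: the statement is the Claim_ definition above) =====
theorem build_adjacency_tickets_spec : Claim_equal_build_adjacency_tickets := by
  intro tickets _ _
  unfold Spec_build_adjacency_tickets build_adjacency_tickets build_adjacency_tickets_alt
  have h0 : (PySem.Dict.empty : PySem.Dict String (List String)) = pvMapSort PySem.Dict.empty := rfl
  rw [h0, pv_fold]
  show (pvMapSort _).items = _
  unfold pvMapSort
  rw [pv_raw_items]
  simp only [List.map_map, Function.comp_def, PySem.List.dedup_eq_ofList]
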